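-- pv_equiv track=rewrite | github.com/RoyceRichmond/essential-programming-language | interprete.py | assi
-- ===== SOURCE A (Python) =====
-- def incr (a):
--     return (a+1)
--
-- def decr (a):
--     while (a!=0):
--         return (a-1)
--     return (a)
--
-- def clr (a):
--     while (a!=0):
--         a=decr(a)
--     return (a)
--
-- def assi (x1,x2):
--     aux=1
--     aux=clr(aux)
--     x1=clr(x1)
--     while (x2!=0):
--         aux=incr(aux)
--         x2=decr(x2)
--     while (aux!=0):
--         x1=incr(x1)
--         x2=incr(x2)
--         aux=decr(aux)
--     return(x1)
-- ===== SOURCE B (Python) =====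
-- def assi(x1, x2):
--     return x2
-- ===== Notes on version B (the rewrite author's own statement) =====
-- stated objective: faster
-- what changed: replaces the two counting loops (clear x1, copy x2 into aux, then increment x1 aux times) with directly returning x2
import Mathlib
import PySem

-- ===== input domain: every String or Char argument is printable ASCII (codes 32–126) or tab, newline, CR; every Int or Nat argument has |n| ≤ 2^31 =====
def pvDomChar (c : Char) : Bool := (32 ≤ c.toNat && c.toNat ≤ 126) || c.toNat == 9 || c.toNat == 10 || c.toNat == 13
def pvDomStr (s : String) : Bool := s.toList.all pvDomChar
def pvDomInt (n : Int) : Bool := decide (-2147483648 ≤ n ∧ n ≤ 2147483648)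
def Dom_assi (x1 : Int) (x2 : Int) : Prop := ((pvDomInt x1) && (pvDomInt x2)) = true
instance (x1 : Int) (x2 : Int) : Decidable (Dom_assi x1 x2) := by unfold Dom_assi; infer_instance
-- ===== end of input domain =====

-- B replaces A's unary counting loops by returning x2 directly: O(1) instead of O(x2).

-- ===== PORT A =====
def pyIncr (a : Int) : Int := a + 1

def pyDecr (a : Int) : Int := if a ≠ 0 then a - 1 else a

-- clr: while (a!=0): a = decr(a).  Diverges in Python for a < 0; the 0 < a guard is a
-- termination guard only (the loop is only entered on inputs where it terminates, i.e. a > 0).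
def pyClr (a : Int) : Int :=
  if h : 0 < a then pyClr (pyDecr a) else a
termination_by a.toNat
decreasing_by simp only [pyDecr]; split <;> omega

-- first while loop of assi: while (x2!=0): aux=incr(aux); x2=decr(x2)
def assiLoop1 (aux x2 : Int) : Int × Int :=
  if h : 0 < x2 then assiLoop1 (pyIncr aux) (pyDecr x2) else (aux, x2)
termination_by x2.toNat
decreasing_by simp only [pyDecr]; split <;> omega

-- second while loop: while (aux!=0): x1=incr(x1); x2=incr(x2); aux=decr(aux)
def assiLoop2 (x1 x2 aux : Int) : Int × Int × Int :=
  if h : 0 < aux then assiLoop2 (pyIncr x1) (pyIncr x2) (pyDecr aux) else (x1, x2, aux)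
termination_by aux.toNat
decreasing_by simp only [pyDecr]; split <;> omega

def assi (x1 : Int) (x2 : Int) : Int :=
  let aux := pyClr 1
  let x1 := pyClr x1
  let p := assiLoop1 aux x2
  let q := assiLoop2 x1 p.2 p.1
  q.1

-- ===== PORT B =====
def assi_alt (x1 : Int) (x2 : Int) : Int := x2

-- ===== PRECONDITION & SPEC =====
-- Pre_ excludes negative x1 or x2, on which Python A's while-loops never terminate (no value is returned).
def Pre_assi (x1 : Int) (x2 : Int) : Prop := 0 ≤ x1 ∧ 0 ≤ x2
instance (x1 : Int) (x2 : Int) : Decidable (Pre_assi x1 x2) := by unfold Pre_assi; infer_instance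
def pvWitness_assi : Int × Int := (3, 5)

def Spec_assi (x1 : Int) (x2 : Int) (out : Int) : Prop := out = assi_alt x1 x2
instance (x1 : Int) (x2 : Int) (out : Int) : Decidable (Spec_assi x1 x2 out) := by unfold Spec_assi; infer_instance

-- ===== CLAIM (what is proved, stated in full; the proofs are below) =====
def Claim_equal_assi : Prop := ∀ (x1 : Int) (x2 : Int), Dom_assi x1 x2 → Pre_assi x1 x2 → Spec_assi x1 x2 (assi x1 x2)

-- ===== LEMMAS AND PROOFS =====

theorem pyDecr_pos (a : Int) (h : 0 < a) : pyDecr a = a - 1 := by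
  simp [pyDecr]; omega

theorem pyClr_nonneg (a : Int) (h : 0 ≤ a) : pyClr a = 0 := by
  induction hn : a.toNat generalizing a with
  | zero =>
    have : a = 0 := by omega
    subst this
    simp [pyClr]
  | succ n ih =>
    have hpos : 0 < a := by omega
    rw [pyClr, dif_pos hpos, pyDecr_pos a hpos]
    exact ih (a - 1) (by omega) (by omega)

theorem assiLoop1_eq (aux x2 : Int) (h : 0 ≤ x2) : assiLoop1 aux x2 = (aux + x2, 0) := by
  induction hn : x2.toNat generalizing aux x2 with
  | zero =>
    have : x2 = 0 := by omega
    subst this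
    rw [assiLoop1]
    simp
  | succ n ih =>
    have hpos : 0 < x2 := by omega
    rw [assiLoop1, dif_pos hpos, pyDecr_pos x2 hpos]
    rw [ih (pyIncr aux) (x2 - 1) (by omega) (by omega)]
    simp [pyIncr]

theorem assiLoop2_fst (x1 x2 aux : Int) (h : 0 ≤ aux) : (assiLoop2 x1 x2 aux).1 = x1 + aux := by
  induction hn : aux.toNat generalizing x1 x2 aux with
  | zero =>
    have : aux = 0 := by omega
    subst this
    rw [assiLoop2]
    simp
  | succ n ih =>
    have hpos : 0 < aux := by omega
    rw [assiLoop2, dif_pos hpos, pyDecr_pos aux hpos]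
    rw [ih (pyIncr x1) (pyIncr x2) (aux - 1) (by omega) (by omega)]
    simp [pyIncr]

-- ===== VERDICT (by name: the statement is the Claim_ definition above) =====
theorem assi_spec : Claim_equal_assi := by
  intro x1 x2 _ hpre
  unfold Spec_assi assi assi_alt
  simp only [pyClr_nonneg 1 (by omega), pyClr_nonneg x1 hpre.1,
      assiLoop1_eq 0 x2 hpre.2, zero_add]
  show (assiLoop2 0 0 x2).1 = x2
  rw [assiLoop2_fst 0 0 x2 hpre.2]
  omega
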